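-- pv_equiv track=rewrite | github.com/dterracino/color_tools | tooling/analyze_filamentcolors_data.py | extract_finish_from_name
-- ===== SOURCE A (Python) =====
-- def extract_finish_from_name(color_name):
--     """
--     Extract finish from color name ONLY if we're absolutely certain.
--
--     Conservative extraction - only for known manufacturer patterns.
--     Otherwise returns (None, original_name) to avoid data corruption.
--
--     Returns:
--         tuple: (finish or None, cleaned_color_name or original_name)
--     """
--     # ONLY extract finishes we're 100% certain about
--     # These are manufacturer-specific naming conventions we trust
--     certain_finishes = [
--         "Matte ",      # Bambu Lab convention
--         "Silk ",       # Bambu Lab convention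
--         "Basic ",      # Bambu Lab convention
--     ]
--
--     for finish_prefix in certain_finishes:
--         if color_name.startswith(finish_prefix):
--             finish = finish_prefix.strip()
--             cleaned_name = color_name.replace(finish_prefix, "", 1)
--             return finish, cleaned_name
--
--     # For everything else: keep original name, no finish extraction
--     # We can post-process these later with better logic or manual curation
--     return None, color_name
-- ===== SOURCE B (Python) =====
-- FINISH_WORDS = {"Matte", "Silk", "Basic"}
--
-- def extract_finish_from_name(color_name):
--     head, sep, rest = color_name.partition(" ")
--     if sep and head in FINISH_WORDS:
--         return head, rest
--     return None, color_name
-- ===== Notes on version B (the rewrite author's own statement) =====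
-- stated objective: simpler
-- what changed: Replaces the three-way startswith loop plus strip/replace with a single partition on the first space followed by a set-membership test on the head token.
import Mathlib
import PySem

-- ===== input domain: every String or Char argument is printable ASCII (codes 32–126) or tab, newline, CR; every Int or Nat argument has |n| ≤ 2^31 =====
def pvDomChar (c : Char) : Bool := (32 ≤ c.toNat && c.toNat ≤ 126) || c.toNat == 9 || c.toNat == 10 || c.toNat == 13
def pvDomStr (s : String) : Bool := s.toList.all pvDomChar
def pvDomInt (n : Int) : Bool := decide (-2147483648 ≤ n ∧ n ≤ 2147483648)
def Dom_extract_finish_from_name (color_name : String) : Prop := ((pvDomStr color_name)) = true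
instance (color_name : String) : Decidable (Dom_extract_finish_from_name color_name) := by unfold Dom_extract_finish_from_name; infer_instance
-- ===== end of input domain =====

-- B replaces A's three-way startswith loop (with strip/replace) by one partition on the
-- first space followed by a set-membership test on the head token (objective: simpler).

-- ===== PORT A =====
-- s.replace(old, "", 1) for nonempty old: remove the FIRST occurrence (exact hand port)
def pyReplace1Del (s old : List Char) : List Char :=
  let i := PySem.Chars.find s old
  if i = -1 then s else s.take i.toNat ++ s.drop (i.toNat + old.length)

def extractLoop (cs : List Char) : List (List Char) → Option String × String
  | [] => (none, String.ofList cs)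
  | p :: rest =>
      if PySem.Chars.startswith cs p then
        (some (String.ofList (PySem.Chars.strip p)), String.ofList (pyReplace1Del cs p))
      else extractLoop cs rest

def extract_finish_from_name (color_name : String) : Option String × String :=
  extractLoop color_name.toList ["Matte ".toList, "Silk ".toList, "Basic ".toList]

-- ===== PORT B =====
-- s.partition(" "): (before first space, " ", after) or (s, "", "") when no space (exact hand port)
def partitionSpace (cs : List Char) : List Char × List Char × List Char :=
  let i := PySem.Chars.find cs [' ']
  if i = -1 then (cs, [], []) else (cs.take i.toNat, [' '], cs.drop (i.toNat + 1))

def extract_finish_from_name_alt (color_name : String) : Option String × String :=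
  let p := partitionSpace color_name.toList
  if p.2.1 ≠ [] ∧ p.1 ∈ ["Matte".toList, "Silk".toList, "Basic".toList] then
    (some (String.ofList p.1), String.ofList p.2.2)
  else (none, color_name)

-- ===== PRECONDITION & SPEC =====
def Spec_extract_finish_from_name (color_name : String) (out : Option String × String) : Prop := out = extract_finish_from_name_alt color_name
instance (color_name : String) (out : Option String × String) : Decidable (Spec_extract_finish_from_name color_name out) := by unfold Spec_extract_finish_from_name; infer_instance

-- ===== CLAIM (what is proved, stated in full; the proofs are below) =====
def Claim_equal_extract_finish_from_name : Prop := ∀ (color_name : String), Dom_extract_finish_from_name color_name → Spec_extract_finish_from_name color_name (extract_finish_from_name color_name)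

-- ===== LEMMAS AND PROOFS =====

-- a singleton prefix pins the head
theorem singleton_prefix_iff (c : Char) (l : List Char) :
    [c] <+: l ↔ ∃ t, l = c :: t := by
  constructor
  · rintro ⟨t, rfl⟩; exact ⟨t, rfl⟩
  · rintro ⟨t, rfl⟩; exact ⟨t, rfl⟩

-- the first space of w ++ ' ' :: t sits exactly at |w| when w is space-free
theorem find_space_of_split (w t : List Char) (hw : ' ' ∉ w) :
    PySem.Chars.find (w ++ ' ' :: t) [' '] = (w.length : Int) := by
  have hinf : [' '] <:+: (w ++ ' ' :: t) :=
    ⟨w, t, by simp⟩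
  have h0 : 0 ≤ PySem.Chars.find (w ++ ' ' :: t) [' '] :=
    (PySem.Chars.find_nonneg_iff _ _).mpr hinf
  obtain ⟨hpre, hmin⟩ := PySem.Chars.find_spec (s := w ++ ' ' :: t) (sub := [' ']) h0
  set n := (PySem.Chars.find (w ++ ' ' :: t) [' ']).toNat with hn
  have hle : n ≤ w.length := by
    by_contra hgt
    exact hmin w.length (by omega) ⟨t, by simp⟩
  have hne : n = w.length := by
    by_contra hne
    have hlt : n < w.length := by omega
    obtain ⟨u, hu⟩ := (singleton_prefix_iff ' ' _).mp hpre
    have : (w ++ ' ' :: t).drop n = w.drop n ++ ' ' :: t := by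
      rw [List.drop_append_of_le_length (by omega)]
    rw [this] at hu
    have hdrop : w.drop n ≠ [] := by
      intro h; have := List.length_drop (l := w) (i := n); rw [h] at this; simp at this; omega
    obtain ⟨a, as, ha⟩ := List.exists_cons_of_ne_nil hdrop
    rw [ha] at hu
    simp at hu
    apply hw
    have : a ∈ w.drop n := by rw [ha]; simp
    rw [hu.1] at this
    exact List.mem_of_mem_drop this
  omega

-- a full match of w ++ " " as a prefix starts at index 0
theorem find_prefix_zero (s p : List Char) (h : p <+: s) :
    PySem.Chars.find s p = 0 := by
  have h0 : 0 ≤ PySem.Chars.find s p :=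
    (PySem.Chars.find_nonneg_iff _ _).mpr h.isInfix
  obtain ⟨hpre, hmin⟩ := PySem.Chars.find_spec (s := s) (sub := p) h0
  by_contra hne
  have : (PySem.Chars.find s p).toNat ≠ 0 := by omega
  exact hmin 0 (by omega) (by simpa using h)

-- matched branch: both sides compute (w, t) on w ++ ' ' :: t
theorem match_branch (w t : List Char) (hw : ' ' ∉ w)
    (hmem : w = "Matte".toList ∨ w = "Silk".toList ∨ w = "Basic".toList) :
    extract_finish_from_name_alt (String.ofList (w ++ ' ' :: t))
      = (some (String.ofList w), String.ofList t) := by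
  have hf := find_space_of_split w t hw
  simp only [extract_finish_from_name_alt, partitionSpace]
  rw [show (String.ofList (w ++ ' ' :: t)).toList = w ++ ' ' :: t by simp, hf]
  have hne : (w.length : Int) ≠ -1 := by omega
  simp only [if_neg hne]
  have htake : (w ++ ' ' :: t).take ((w.length : Int)).toNat = w := by
    simp
  have hdrop : (w ++ ' ' :: t).drop (((w.length : Int)).toNat + 1) = t := by
    rw [show ((w.length : Int)).toNat + 1 = w.length + 1 by simp]
    rw [show w.length + 1 = (w ++ [' ']).length by simp]
    rw [show w ++ ' ' :: t = (w ++ [' ']) ++ t by simp]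
    simp
  rw [htake, hdrop]
  rcases hmem with rfl | rfl | rfl <;> simp

-- unmatched: if no finish prefix matches, B's condition fails
theorem no_match (cs : List Char)
    (h1 : ¬ PySem.Chars.startswith cs ("Matte ".toList) = true)
    (h2 : ¬ PySem.Chars.startswith cs ("Silk ".toList) = true)
    (h3 : ¬ PySem.Chars.startswith cs ("Basic ".toList) = true) :
    ¬ ((partitionSpace cs).2.1 ≠ [] ∧
        (partitionSpace cs).1 ∈ ["Matte".toList, "Silk".toList, "Basic".toList]) := by
  rintro ⟨hsep, hmem⟩
  simp only [partitionSpace] at hsep hmem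
  by_cases hneg : PySem.Chars.find cs [' '] = -1
  · simp [hneg] at hsep
  · simp only [if_neg hneg] at hsep hmem
    have h0 : 0 ≤ PySem.Chars.find cs [' '] := by
      have := PySem.Chars.neg_one_le_find (s := cs) (sub := [' '])
      omega
    obtain ⟨hpre, -⟩ := PySem.Chars.find_spec (s := cs) (sub := [' ']) h0
    obtain ⟨u, hu⟩ := (singleton_prefix_iff ' ' _).mp hpre
    have hsplit : cs = cs.take (PySem.Chars.find cs [' ']).toNat ++ ' ' :: u := by
      rw [← hu]
      exact (List.take_append_drop _ cs).symm
    have hpref : cs.take (PySem.Chars.find cs [' ']).toNat ++ [' '] <+: cs := by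
      refine ⟨u, ?_⟩
      conv_rhs => rw [hsplit]
      simp
    have hsw : PySem.Chars.startswith cs (cs.take (PySem.Chars.find cs [' ']).toNat ++ [' ']) = true :=
      (PySem.Chars.startswith_iff _ _).mpr hpref
    simp only [List.mem_cons, List.not_mem_nil, or_false] at hmem
    rcases hmem with h | h | h
    · exact h1 (by rwa [h] at hsw)
    · exact h2 (by rwa [h] at hsw)
    · exact h3 (by rwa [h] at hsw)

-- each matched startswith case reduces A's branch result to B's
theorem a_branch_eq (cs w : List Char) (hw : ' ' ∉ w)
    (hmem : w = "Matte".toList ∨ w = "Silk".toList ∨ w = "Basic".toList)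
    (hsw : PySem.Chars.startswith cs (w ++ [' ']) = true)
    (hstrip : PySem.Chars.strip (w ++ [' ']) = w) :
    (some (String.ofList (PySem.Chars.strip (w ++ [' ']))), String.ofList (pyReplace1Del cs (w ++ [' '])))
      = extract_finish_from_name_alt (String.ofList cs) := by
  have hpre : (w ++ [' ']) <+: cs := (PySem.Chars.startswith_iff _ _).mp hsw
  obtain ⟨t, ht⟩ := hpre
  have hcs : cs = w ++ ' ' :: t := by rw [← ht]; simp
  subst hcs
  rw [match_branch w t hw hmem, hstrip]
  have hf0 : PySem.Chars.find (w ++ ' ' :: t) (w ++ [' ']) = 0 :=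
    find_prefix_zero _ _ ⟨t, by simp⟩
  simp only [pyReplace1Del, hf0]
  norm_num

-- ===== VERDICT (by name: the statement is the Claim_ definition above) =====
theorem extract_finish_from_name_spec : Claim_equal_extract_finish_from_name := by
  intro s _
  unfold Spec_extract_finish_from_name
  simp only [extract_finish_from_name, extractLoop]
  by_cases h1 : PySem.Chars.startswith s.toList ("Matte ".toList) = true
  · simp only [h1, if_true]
    have := a_branch_eq s.toList ("Matte".toList) (by decide) (Or.inl rfl)
      (by simpa using h1) (by decide)
    simpa using this
  · simp only [h1, if_false, Bool.false_eq_true]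
    by_cases h2 : PySem.Chars.startswith s.toList ("Silk ".toList) = true
    · simp only [h2, if_true]
      have := a_branch_eq s.toList ("Silk".toList) (by decide) (Or.inr (Or.inl rfl))
        (by simpa using h2) (by decide)
      simpa using this
    · simp only [h2, if_false, Bool.false_eq_true]
      by_cases h3 : PySem.Chars.startswith s.toList ("Basic ".toList) = true
      · simp only [h3, if_true]
        have := a_branch_eq s.toList ("Basic".toList) (by decide) (Or.inr (Or.inr rfl))
          (by simpa using h3) (by decide)
        simpa using this
      · simp only [h3, if_false, Bool.false_eq_true]
        have hn := no_match s.toList h1 h2 h3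
        simp only [extract_finish_from_name_alt]
        rw [if_neg hn]
        simp
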